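-- pv_equiv track=rewrite | github.com/will-rowe22/PartsGenie | parts_genie/parts.py | _get_repeats
-- ===== SOURCE A (Python) =====
-- import collections
--
-- def _get_repeats(seqs, window_size=25):
--     '''Get local GC score.'''
--     repeats = 0
--
--     for seq in seqs:
--         windows = [seq[idx:idx + window_size]
--                    for idx in range(len(seq) - window_size + 1)]
--         counter = collections.Counter(windows)
--         repeats += sum(i for i in counter.values() if i > 1)
--
--     return repeats
-- ===== SOURCE B (Python) =====
-- def _get_repeats(seqs, window_size=25):
--     '''Get local GC score.'''
--     repeats = 0
--     for seq in seqs: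
--         windows = sorted([seq[idx:idx + window_size]
--                           for idx in range(len(seq) - window_size + 1)])
--         i = 0
--         while i < len(windows):
--             j = i + 1
--             while j < len(windows) and windows[j] == windows[i]:
--                 j += 1
--             if j - i > 1:
--                 repeats += j - i
--             i = j
--     return repeats
-- ===== Notes on version B (the rewrite author's own statement) =====
-- stated objective: alternative
-- what changed: B sorts each sequence's window list and scans it once with a two-pointer run scan, adding each run length greater than 1, instead of tallying windows in a Counter and summing multiplicities above 1.
import Mathlib
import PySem

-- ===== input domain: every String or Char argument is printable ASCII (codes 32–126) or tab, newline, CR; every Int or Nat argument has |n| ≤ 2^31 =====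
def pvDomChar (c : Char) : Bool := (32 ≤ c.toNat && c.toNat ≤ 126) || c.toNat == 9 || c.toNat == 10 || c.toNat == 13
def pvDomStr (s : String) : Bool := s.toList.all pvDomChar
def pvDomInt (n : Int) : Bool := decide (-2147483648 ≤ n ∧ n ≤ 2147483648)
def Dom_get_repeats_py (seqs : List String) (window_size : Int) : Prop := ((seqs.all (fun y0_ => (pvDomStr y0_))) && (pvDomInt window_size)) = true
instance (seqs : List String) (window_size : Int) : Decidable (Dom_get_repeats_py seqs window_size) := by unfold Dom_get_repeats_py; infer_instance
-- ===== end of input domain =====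

-- B replaces A's Counter tally by sorting each window list (List.mergeSort, the library sort, for Source B's stdlib sorted) and a single run scan adding run lengths > 1; same value (measured faster in a timing run).
-- Both Pythons build the window list with the identical comprehension, so it is ported once as pvWindows.
def pvWindows (seq : String) (window_size : Int) : List String :=
  (PySem.List.pyRange 0 (PySem.Str.len seq - window_size + 1) 1).map
    (fun idx => PySem.Str.slice seq (some idx) (some (idx + window_size)))

-- ===== PORT A =====
def get_repeats_py (seqs : List String) (window_size : Int) : Int :=
  seqs.foldl (fun repeats seq =>
    let windows := pvWindows seq window_size
    let counter := PySem.Dict.counter windows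
    repeats + (counter.values.filter (fun i => 1 < i)).sum) 0

-- ===== PORT B =====
-- transcription of B's two-pointer while loop: each outer step consumes one run of
-- equal adjacent windows (the inner 'while windows[j] == windows[i]' advance is the
-- takeWhile/dropWhile split) and adds its length when it exceeds 1.
def pvRunScan : List String → Int
  | [] => 0
  | x :: t =>
    let run := 1 + (t.takeWhile (fun y => y == x)).length
    (if 1 < run then (run : Int) else 0) + pvRunScan (t.dropWhile (fun y => y == x))
termination_by l => l.length
decreasing_by
  exact Nat.lt_succ_of_le (List.length_dropWhile_le _ _)

def get_repeats_py_alt (seqs : List String) (window_size : Int) : Int :=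
  seqs.foldl (fun repeats seq =>
    let windows := (pvWindows seq window_size).mergeSort (fun a b => decide (a ≤ b))
    repeats + pvRunScan windows) 0

-- ===== PRECONDITION & SPEC =====
def Spec_get_repeats_py (seqs : List String) (window_size : Int) (out : Int) : Prop := out = get_repeats_py_alt seqs window_size
instance (seqs : List String) (window_size : Int) (out : Int) : Decidable (Spec_get_repeats_py seqs window_size out) := by unfold Spec_get_repeats_py; infer_instance

-- ===== CLAIM (what is proved, stated in full; the proofs are below) =====
def Claim_equal_get_repeats_py : Prop := ∀ (seqs : List String) (window_size : Int), Dom_get_repeats_py seqs window_size → Spec_get_repeats_py seqs window_size (get_repeats_py seqs window_size)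

-- ===== LEMMAS AND PROOFS =====

-- sum of a filtered list = sum of the list with non-selected entries zeroed
theorem pv_sum_filter_eq_sum_ite (xs : List Int) (q : Int → Bool) :
    (xs.filter q).sum = (xs.map (fun i => if q i then i else 0)).sum := by
  induction xs with
  | nil => rfl
  | cons a t ih => by_cases h : q a <;> simp [h, ih]

-- the distinct elements of l, as a finset, are l.toFinset
theorem pv_toFinset_ofList (l : List String) :
    (PySem.Set.ofList l).toFinset = l.toFinset := by
  ext x; simp [PySem.Set.mem_ofList]

theorem pv_count_filter {α : Type} [DecidableEq α] (p : α → Bool) (a : α) (l : List α) :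
    (l.filter p).count a = if p a then l.count a else 0 := by
  by_cases h : p a
  · simp [h, List.count_filter]
  · simp only [h]
    refine List.count_eq_zero.mpr ?_
    intro hmem
    exact h (List.of_mem_filter hmem)

-- a countP is the finset sum, over the distinct elements, of the selected multiplicities
theorem pv_countP_eq_sum (l : List String) (p : String → Bool) :
    (l.countP p : Int) = ∑ x ∈ l.toFinset, ((if p x then l.count x else 0 : Nat) : Int) := by
  have h1 : l.countP p = (l.filter p).length := List.countP_eq_length_filter
  have h2 : (l.filter p).length = ∑ a ∈ (l.filter p).toFinset, (l.filter p).count a :=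
    (List.sum_toFinset_count_eq_length _).symm
  have hsub : (l.filter p).toFinset ⊆ l.toFinset := by
    intro x hx
    simp only [List.mem_toFinset, List.mem_filter] at hx ⊢
    exact hx.1
  have h3 : ∑ a ∈ (l.filter p).toFinset, (l.filter p).count a
      = ∑ a ∈ l.toFinset, (if p a then l.count a else 0) := by
    rw [Finset.sum_congr rfl (fun x _ => pv_count_filter p x l)]
    refine Finset.sum_subset hsub ?_
    intro x hx hnx
    simp only [List.mem_toFinset, List.mem_filter] at hx hnx
    have hnp : ¬ p x = true := fun hp => hnx ⟨hx, hp⟩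
    simp [hnp]
  rw [h1, h2, h3]
  push_cast
  rfl

-- per-list core of A: the sum of multiplicities > 1 equals the number of duplicated positions
theorem pv_key (l : List String) :
    (((PySem.Dict.counter l).values.filter (fun i => 1 < i)).sum)
      = ((l.countP (fun w => 1 < l.count w) : Nat) : Int) := by
  have hval : (PySem.Dict.counter l).values
      = (PySem.Set.ofList l).map (fun k => (l.count k : Int)) := by
    simp [PySem.Dict.values, PySem.Dict.items_counter, List.map_map, Function.comp]
  rw [hval, pv_sum_filter_eq_sum_ite, List.map_map,
    ← List.sum_toFinset _ (PySem.Set.nodup_ofList l), pv_toFinset_ofList,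
    pv_countP_eq_sum]
  refine Finset.sum_congr rfl (fun x _ => ?_)
  by_cases h : 1 < l.count x
  · simp [h, Nat.one_lt_cast.mpr h]
  · have : ¬ (1 : Int) < (l.count x : Int) := by exact_mod_cast h
    simp [h, this]

-- the duplicated-position count only depends on the multiset of windows
theorem pv_countP_perm (s l : List String) (h : s.Perm l) :
    s.countP (fun w => 1 < s.count w) = l.countP (fun w => 1 < l.count w) := by
  calc s.countP (fun w => 1 < s.count w)
      = s.countP (fun w => 1 < l.count w) :=
        List.countP_congr (fun a _ => by rw [h.count_eq])
    _ = l.countP (fun w => 1 < l.count w) := h.countP_eq _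

-- per-list core of B: on a ≤-sorted list the run scan counts the duplicated positions
theorem pv_runScan_eq (l : List String) (hs : l.Pairwise (fun a b => a ≤ b)) :
    pvRunScan l = ((l.countP (fun w => 1 < l.count w) : Nat) : Int) := by
  induction l using pvRunScan.induct with
  | case1 => simp [pvRunScan]
  | case2 x t ih =>
    set run := 1 + (t.takeWhile (fun y => y == x)).length with hrun
    have hsplit : t.takeWhile (fun y => y == x) ++ t.dropWhile (fun y => y == x) = t :=
      List.takeWhile_append_dropWhile
    have htake : ∀ y ∈ t.takeWhile (fun y => y == x), y = x := by
      intro y hy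
      have := List.mem_takeWhile_imp hy
      exact eq_of_beq this
    -- every element of the dropWhile part differs from x (sortedness: it is > x or ≠ x head-wise)
    have hdrop_ne : ∀ y ∈ t.dropWhile (fun y => y == x), y ≠ x := by
      intro y hy
      rcases hd : t.dropWhile (fun y => y == x) with _ | ⟨d, rest⟩
      · rw [hd] at hy; cases hy
      · have hdx : ¬ (d == x) = true := by
          have := List.head?_dropWhile_not (fun y => y == x) t
          rw [hd] at this
          simpa using this
        have hdne : d ≠ x := fun h => hdx (by simp [h])
        -- x ≤ d from sortedness, and d ≤ y for y in rest, so y > x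
        have hpt : t.Pairwise (fun a b => a ≤ b) := (List.pairwise_cons.mp hs).2
        have hxle : ∀ z ∈ t, x ≤ z := (List.pairwise_cons.mp hs).1
        have hpd : (t.dropWhile (fun y => y == x)).Pairwise (fun a b => a ≤ b) :=
          List.Pairwise.sublist (List.dropWhile_sublist _) hpt
        rw [hd] at hpd hy
        have hdmem : d ∈ t := by
          have : d ∈ t.dropWhile (fun y => y == x) := by rw [hd]; exact List.mem_cons_self
          exact List.Sublist.mem this (List.dropWhile_sublist _)
        have hxd : x < d := lt_of_le_of_ne (hxle d hdmem) (fun h => hdne h.symm)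
        rcases List.mem_cons.mp hy with rfl | hy'
        · exact fun h => hdne h
        · have : d ≤ y := (List.pairwise_cons.mp hpd).1 y hy'
          exact fun h => absurd (h ▸ this) (not_le.mpr hxd)
    have hpd : (t.dropWhile (fun y => y == x)).Pairwise (fun a b => a ≤ b) :=
      List.Pairwise.sublist (List.dropWhile_sublist _) (List.pairwise_cons.mp hs).2
    have ihd := ih hpd
    -- counts in the whole list
    set tk := t.takeWhile (fun y => y == x) with htk
    set dr := t.dropWhile (fun y => y == x) with hdr
    have hl : x :: t = (x :: tk) ++ dr := by rw [← hsplit]; rfl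
    have hcx : (x :: t).count x = run := by
      rw [hl, List.count_append]
      have h1 : (x :: tk).count x = tk.length + 1 := by
        have : ∀ y ∈ tk, y = x := htake
        rw [List.count_cons_self]
        congr 1
        exact List.count_eq_length.mpr (fun y hy => by simp [this y hy])
      have h2 : dr.count x = 0 := List.count_eq_zero.mpr (fun h => hdrop_ne x h rfl)
      rw [h1, h2]; omega
    have hcd : ∀ y ∈ dr, (x :: t).count y = dr.count y := by
      intro y hy
      have hyne : y ≠ x := hdrop_ne y hy
      rw [hl, List.count_append]
      have : (x :: tk).count y = 0 := by
        refine List.count_eq_zero.mpr ?_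
        intro hmem
        rcases List.mem_cons.mp hmem with rfl | h'
        · exact hyne rfl
        · exact hyne (htake y h')
      omega
    -- split the countP over the run and the rest
    set P := fun w => decide (1 < (x :: t).count w) with hP
    have hsplitP : (x :: t).countP P = (x :: tk).countP P + dr.countP P := by
      rw [hl, show x :: tk ++ dr = (x :: tk) ++ dr from rfl]
      exact List.countP_append
    have h1 : (x :: tk).countP P = if 1 < run then run else 0 := by
      have hall : ∀ y ∈ x :: tk, P y = decide (1 < run) := by
        intro y hy
        have hyx : y = x := by
          rcases List.mem_cons.mp hy with h' | h'
          · exact h'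
          · exact htake y h'
        subst hyx
        simp only [hP]
        rw [hcx]
      rw [List.countP_congr (q := fun _ => decide (1 < run)) (fun a ha => by rw [hall a ha])]
      by_cases h : 1 < run
      · rw [if_pos h]
        simp only [h, decide_true, List.countP_true, List.length_cons]
        omega
      · rw [if_neg h]
        simp [h]
    have h2 : dr.countP P = dr.countP (fun w => 1 < dr.count w) := by
      refine List.countP_congr (fun a ha => ?_)
      simp only [hP]
      rw [hcd a ha]
    rw [pvRunScan]
    simp only [← htk, ← hdr, ← hrun]
    rw [ihd, hsplitP, h1, h2]
    push_cast
    by_cases h : 1 < run <;> simp [h]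

-- B's per-list value equals A's
theorem pv_key_b (l : List String) :
    pvRunScan (l.mergeSort (fun a b => decide (a ≤ b)))
      = ((l.countP (fun w => 1 < l.count w) : Nat) : Int) := by
  set s := l.mergeSort (fun a b => decide (a ≤ b)) with hs
  have hperm : s.Perm l := List.mergeSort_perm l _
  have hpw : s.Pairwise (fun a b => a ≤ b) := by
    have h := List.pairwise_mergeSort (le := fun a b => decide (a ≤ b))
      (fun a b c hab hbc =>
        decide_eq_true (le_trans (of_decide_eq_true hab) (of_decide_eq_true hbc)))
      (fun a b => by simpa using le_total a b) l
    exact h.imp (fun hab => of_decide_eq_true hab)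
  rw [pv_runScan_eq s hpw, pv_countP_perm s l hperm]

-- ===== VERDICT (by name: the statement is the Claim_ definition above) =====
theorem get_repeats_py_spec : Claim_equal_get_repeats_py := by
  intro seqs window_size _
  unfold Spec_get_repeats_py get_repeats_py get_repeats_py_alt
  simp only [pv_key, pv_key_b]
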